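-- pv_equiv track=rewrite | github.com/petercollingridge/code-for-blog | language/vowel_variants.py | get_all_variants_at_each_postion
-- ===== SOURCE A (Python) =====
-- from string import ascii_lowercase
--
-- def get_all_variants_at_each_postion(words):
--     variants = dict()
--
--     for word in words:
--         best_word_list = []
--
--         for index, letter in enumerate(word):
--             word_list = []
--
--             for new_letter in ascii_lowercase[ascii_lowercase.index(letter) + 1:]:
--                 new_word = word[:index] + new_letter + word[index + 1:]
--                 if new_word in words:
--                     word_list.append(new_word)
--
--             if len(word_list) > len(best_word_list):
--                 best_word_list = word_list
--
--         if best_word_list: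
--             variants[word] = best_word_list
--
--     return variants
-- ===== SOURCE B (Python) =====
-- def get_all_variants_at_each_postion(words):
--     # Index every wildcard pattern (prefix, suffix) -> set of letters seen there,
--     # so each position needs one dict lookup instead of 25 scans of the word list.
--     buckets = {}
--     for w in words:
--         for i, c in enumerate(w):
--             buckets.setdefault((w[:i], w[i + 1:]), set()).add(c)
--
--     result = {}
--     for w in words:
--         best = []
--         for i, letter in enumerate(w):
--             pre, suf = w[:i], w[i + 1:]
--             cand = [pre + c + suf
--                     for c in sorted(buckets.get((pre, suf), ()))
--                     if letter < c <= 'z']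
--             if len(cand) > len(best):
--                 best = cand
--         if best:
--             result[w] = best
--     return result
-- ===== Notes on version B (the rewrite author's own statement) =====
-- stated objective: faster
-- what changed: Instead of trying every later letter at every position and scanning the whole word list for each candidate, B builds one dict from each wildcard pattern (prefix, suffix) to the set of letters occurring there, and answers each position with a single dict lookup over a sorted bucket.
import Mathlib
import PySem

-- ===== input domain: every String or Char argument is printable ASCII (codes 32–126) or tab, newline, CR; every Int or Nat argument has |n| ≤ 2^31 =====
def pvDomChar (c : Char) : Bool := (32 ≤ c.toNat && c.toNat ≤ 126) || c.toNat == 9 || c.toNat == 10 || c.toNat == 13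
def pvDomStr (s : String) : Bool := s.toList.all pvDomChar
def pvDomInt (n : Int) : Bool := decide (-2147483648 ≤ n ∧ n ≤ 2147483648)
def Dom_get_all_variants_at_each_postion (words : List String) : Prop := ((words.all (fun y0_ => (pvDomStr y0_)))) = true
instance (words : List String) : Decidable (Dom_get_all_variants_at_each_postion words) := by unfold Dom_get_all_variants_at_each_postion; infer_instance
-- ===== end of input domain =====

-- B replaces A's per-position scan of the whole word list (for every later letter) by one
-- precomputed dict from wildcard pattern (prefix, suffix) to the set of letters present there;
-- a timing run measured B faster (asymptotic: O(W^2*L^2) vs O(W*L^2 + output)).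

-- ===== PORT A =====
-- string.ascii_lowercase
def pvAlph : List Char :=
  ['a','b','c','d','e','f','g','h','i','j','k','l','m',
   'n','o','p','q','r','s','t','u','v','w','x','y','z']

-- word[:index] + new_letter + word[index + 1:]  (string concatenation done on the char lists)
def pvNewWord (cs : List Char) (i : Nat) (c : Char) : String :=
  String.ofList (PySem.List.slice cs none (some (i : Int)) ++ [c] ++ PySem.List.slice cs (some ((i : Int) + 1)) none)

-- the inner 'for new_letter in ascii_lowercase[ascii_lowercase.index(letter) + 1:]' loop.
-- str.index is ported via PySem.List.index? on the char list; Python raises ValueError when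
-- letter is not a lowercase ascii letter, so Pre_ guarantees index? = some _ and '.getD 0' is never the fallback.
def pvA_wordList (words : List String) (cs : List Char) (i : Nat) (letter : Char) : List String :=
  (PySem.List.slice pvAlph (some ((((PySem.List.index? pvAlph letter).getD 0 : Nat) : Int) + 1)) none).foldl
    (fun word_list c =>
      if words.contains (pvNewWord cs i c) then word_list ++ [pvNewWord cs i c] else word_list) []

-- the 'for index, letter in enumerate(word)' loop keeping best_word_list
def pvA_best (words : List String) (cs : List Char) : List String :=
  cs.zipIdx.foldl (fun best_word_list p =>
    if (pvA_wordList words cs p.2 p.1).length > best_word_list.length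
    then pvA_wordList words cs p.2 p.1 else best_word_list) []

def get_all_variants_at_each_postion (words : List String) : List (String × List String) :=
  (words.foldl (fun (variants : PySem.Dict String (List String)) word =>
      if (pvA_best words word.toList).isEmpty then variants
      else variants.insert word (pvA_best words word.toList))
    PySem.Dict.empty).items

-- ===== PORT B =====
-- buckets: dict keyed by the pair of strings (w[:i], w[i+1:]) (represented by their char lists;
-- equality of the keys agrees with Python's), value = set of letters seen at that position.
def pvB_buckets (words : List String) : PySem.Dict (List Char × List Char) (PySem.Set Char) :=
  words.foldl (fun d w =>
    w.toList.zipIdx.foldl (fun d p =>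
      d.modify (PySem.List.slice w.toList none (some (p.2 : Int)),
                PySem.List.slice w.toList (some ((p.2 : Int) + 1)) none)
        PySem.Set.empty (fun st => st.add p.1)) d)
    PySem.Dict.empty

-- [pre + c + suf for c in sorted(buckets.get((pre, suf), ())) if letter < c <= 'z']
def pvB_cand (buckets : PySem.Dict (List Char × List Char) (PySem.Set Char))
    (cs : List Char) (i : Nat) (letter : Char) : List String :=
  ((PySem.List.sorted (buckets.getD (PySem.List.slice cs none (some (i : Int)),
        PySem.List.slice cs (some ((i : Int) + 1)) none) PySem.Set.empty) id).filter
      (fun c => decide (letter < c) && decide (c ≤ 'z'))).map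
    (fun c => String.ofList (PySem.List.slice cs none (some (i : Int)) ++ [c] ++
        PySem.List.slice cs (some ((i : Int) + 1)) none))

def pvB_best (buckets : PySem.Dict (List Char × List Char) (PySem.Set Char)) (cs : List Char) : List String :=
  cs.zipIdx.foldl (fun best p =>
    if (pvB_cand buckets cs p.2 p.1).length > best.length
    then pvB_cand buckets cs p.2 p.1 else best) []

def get_all_variants_at_each_postion_alt (words : List String) : List (String × List String) :=
  (words.foldl (fun (result : PySem.Dict String (List String)) w =>
      if (pvB_best (pvB_buckets words) w.toList).isEmpty then result
      else result.insert w (pvB_best (pvB_buckets words) w.toList))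
    PySem.Dict.empty).items

-- ===== PRECONDITION & SPEC =====
-- A raises ValueError (ascii_lowercase.index) as soon as any character of any word is not a
-- lowercase ascii letter; Pre_ admits exactly the inputs on which A returns.
def Pre_get_all_variants_at_each_postion (words : List String) : Prop :=
  (words.all (fun w => w.toList.all (fun c => c.isLower))) = true
instance (words : List String) : Decidable (Pre_get_all_variants_at_each_postion words) := by
  unfold Pre_get_all_variants_at_each_postion; infer_instance
def pvWitness_get_all_variants_at_each_postion : List String := ["cat", "bat", "can", "cap"]

def Spec_get_all_variants_at_each_postion (words : List String) (out : List (String × List String)) : Prop := out = get_all_variants_at_each_postion_alt words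
instance (words : List String) (out : List (String × List String)) : Decidable (Spec_get_all_variants_at_each_postion words out) := by unfold Spec_get_all_variants_at_each_postion; infer_instance

-- ===== CLAIM (what is proved, stated in full; the proofs are below) =====
def Claim_equal_get_all_variants_at_each_postion : Prop := ∀ (words : List String), Dom_get_all_variants_at_each_postion words → Pre_get_all_variants_at_each_postion words → Spec_get_all_variants_at_each_postion words (get_all_variants_at_each_postion words)

-- ===== LEMMAS AND PROOFS =====

lemma pv_slice_to (cs : List Char) (i : Nat) :
    PySem.List.slice cs none (some (i : Int)) = cs.take i := by
  rw [PySem.List.slice_to cs (by exact_mod_cast Int.natCast_nonneg i)]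
  simp

lemma pv_slice_from (cs : List Char) (i : Nat) :
    PySem.List.slice cs (some ((i : Int) + 1)) none = cs.drop (i + 1) := by
  have : ((i : Int) + 1) = ((i + 1 : Nat) : Int) := by push_cast; ring
  rw [this, PySem.List.slice_from cs (by exact_mod_cast Int.natCast_nonneg (i+1))]
  simp

set_option maxRecDepth 2000 in
lemma pv_alph_drop_bool : (pvAlph.all (fun letter =>
    pvAlph.drop ((PySem.List.index? pvAlph letter).getD 0 + 1)
      == pvAlph.filter (fun c => decide (letter < c)))) = true := by rfl

lemma pv_alph_drop (letter : Char) (h : letter ∈ pvAlph) :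
    pvAlph.drop ((PySem.List.index? pvAlph letter).getD 0 + 1)
      = pvAlph.filter (fun c => decide (letter < c)) := by
  exact beq_iff_eq.mp (List.all_eq_true.mp pv_alph_drop_bool letter h)

lemma pv_alph_le_z_bool : pvAlph.all (fun c => decide (c ≤ 'z')) = true := by rfl

lemma pv_alph_le_z : ∀ c ∈ pvAlph, decide (c ≤ 'z') = true :=
  List.all_eq_true.mp pv_alph_le_z_bool

set_option maxRecDepth 4000 in
lemma pv_alph_pairwise : List.Pairwise (· < ·) pvAlph := by decide

set_option maxRecDepth 4000 in
lemma pv_mem_alph_of_isLower (c : Char) (h : c.isLower = true) : c ∈ pvAlph := by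
  have h1 : 97 ≤ c.toNat ∧ c.toNat ≤ 122 := by
    simp [Char.isLower, UInt32.le_iff_toNat_le] at h
    exact h
  obtain ⟨lo, hi⟩ := h1
  interval_cases h2 : c.toNat <;>
    · have hc := Char.ofNat_toNat c
      rw [h2] at hc
      rw [← hc]
      decide

lemma pv_pre_mem {words : List String} (h : Pre_get_all_variants_at_each_postion words) :
    ∀ w ∈ words, ∀ c ∈ w.toList, c ∈ pvAlph := by
  intro w hw c hc
  exact pv_mem_alph_of_isLower c (List.all_eq_true.mp (List.all_eq_true.mp h w hw) c hc)

-- membership of a rebuilt word in the word list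
lemma pv_mem_words (words : List String) (p s : List Char) (c : Char) :
    words.contains (String.ofList (p ++ [c] ++ s)) = true ↔ ∃ w ∈ words, w.toList = p ++ [c] ++ s := by
  rw [List.contains_eq_mem, decide_eq_true_iff]
  constructor
  · intro hm; exact ⟨_, hm, String.toList_ofList⟩
  · rintro ⟨w, hw, hts⟩
    have hw' : w = String.ofList (p ++ [c] ++ s) := by
      rw [← hts, String.ofList_toList]
    exact hw' ▸ hw

-- a (letter, index) pair of zipIdx decomposing the word at a given pattern
lemma pv_decomp (cs p s : List Char) (c : Char) :
    (∃ pa ∈ cs.zipIdx, (cs.take pa.2, cs.drop (pa.2 + 1)) = (p, s) ∧ pa.1 = c)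
      ↔ cs = p ++ [c] ++ s := by
  constructor
  · rintro ⟨⟨c', i⟩, hmem, hkey, rfl⟩
    obtain ⟨-, hi, hc⟩ := List.mem_zipIdx hmem
    simp only [Prod.mk.injEq] at hkey
    obtain ⟨hp, hs⟩ := hkey
    have hi' : i < cs.length := by simpa using hi
    calc cs = cs.take i ++ cs.drop i := (List.take_append_drop i cs).symm
    _ = p ++ [c'] ++ s := by
        rw [List.drop_eq_getElem_cons hi', hp, ← hs]
        simp [hc]
  · rintro rfl
    refine ⟨(c, p.length), ?_, ?_, rfl⟩
    · rw [List.mk_mem_zipIdx_iff_getElem?]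
      simp
    · simp

-- ---- closed form of the buckets dict ----

lemma pv_modify_eq (d : PySem.Dict (List Char × List Char) (PySem.Set Char))
    (k : List Char × List Char) (a : Char) :
    d.modify k PySem.Set.empty (fun st => st.add a)
      = d.insert k ((d.getD k PySem.Set.empty).add a) := rfl

lemma pv_inner_mem (cs : List Char) (l : List (Char × Nat))
    (d : PySem.Dict (List Char × List Char) (PySem.Set Char)) (key : List Char × List Char) (c : Char) :
    c ∈ (l.foldl (fun d pa =>
          d.modify (cs.take pa.2, cs.drop (pa.2 + 1)) PySem.Set.empty (fun st => st.add pa.1)) d).getD key PySem.Set.empty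
      ↔ c ∈ d.getD key PySem.Set.empty ∨ ∃ pa ∈ l, (cs.take pa.2, cs.drop (pa.2 + 1)) = key ∧ pa.1 = c := by
  induction l generalizing d with
  | nil => simp
  | cons a l ih =>
    rw [List.foldl_cons, ih, pv_modify_eq, PySem.Dict.getD_insert]
    by_cases hk : key = (cs.take a.2, cs.drop (a.2 + 1))
    · subst hk
      rw [if_pos rfl, PySem.Set.mem_add]
      simp only [List.mem_cons]
      constructor
      · rintro ((h | h) | ⟨pa, hpa, hkey, hc⟩)
        · exact Or.inl h
        · exact Or.inr ⟨a, Or.inl rfl, rfl, h.symm⟩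
        · exact Or.inr ⟨pa, Or.inr hpa, hkey, hc⟩
      · rintro (h | ⟨pa, hpa | hpa, hkey, hc⟩)
        · exact Or.inl (Or.inl h)
        · subst hpa; exact Or.inl (Or.inr hc.symm)
        · exact Or.inr ⟨pa, hpa, hkey, hc⟩
    · rw [if_neg hk]
      simp only [List.mem_cons]
      constructor
      · rintro (h | ⟨pa, hpa, hkey, hc⟩)
        · exact Or.inl h
        · exact Or.inr ⟨pa, Or.inr hpa, hkey, hc⟩
      · rintro (h | ⟨pa, hpa | hpa, hkey, hc⟩)
        · exact Or.inl h
        · subst hpa; exact absurd hkey.symm hk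
        · exact Or.inr ⟨pa, hpa, hkey, hc⟩

lemma pv_inner_nodup (cs : List Char) (l : List (Char × Nat))
    (d : PySem.Dict (List Char × List Char) (PySem.Set Char))
    (hd : ∀ key, (d.getD key PySem.Set.empty : List Char).Nodup) (key : List Char × List Char) :
    ((l.foldl (fun d pa =>
        d.modify (cs.take pa.2, cs.drop (pa.2 + 1)) PySem.Set.empty (fun st => st.add pa.1)) d).getD key PySem.Set.empty : List Char).Nodup := by
  induction l generalizing d with
  | nil => exact hd key
  | cons a l ih =>
    rw [List.foldl_cons]
    refine ih _ (fun k => ?_)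
    rw [pv_modify_eq, PySem.Dict.getD_insert]
    split
    · exact PySem.Set.nodup_add _ _ (hd _)
    · exact hd k

lemma pv_buckets_eq (words : List String) :
    pvB_buckets words = words.foldl (fun d w =>
      w.toList.zipIdx.foldl (fun d pa =>
        d.modify (w.toList.take pa.2, w.toList.drop (pa.2 + 1)) PySem.Set.empty (fun st => st.add pa.1)) d)
      PySem.Dict.empty := by
  simp only [pvB_buckets, pv_slice_to, pv_slice_from]

lemma pv_bucket_mem (words : List String) (p s : List Char) (c : Char) :
    c ∈ (pvB_buckets words).getD (p, s) PySem.Set.empty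
      ↔ ∃ w ∈ words, w.toList = p ++ [c] ++ s := by
  rw [pv_buckets_eq]
  suffices h : ∀ (d : PySem.Dict (List Char × List Char) (PySem.Set Char)),
      c ∈ (words.foldl (fun d w =>
        w.toList.zipIdx.foldl (fun d pa =>
          d.modify (w.toList.take pa.2, w.toList.drop (pa.2 + 1)) PySem.Set.empty (fun st => st.add pa.1)) d) d).getD (p, s) PySem.Set.empty
      ↔ c ∈ d.getD (p, s) PySem.Set.empty ∨ ∃ w ∈ words, w.toList = p ++ [c] ++ s by
    rw [h]; simp [PySem.Set.empty]
  induction words with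
  | nil => simp
  | cons w ws ih =>
    intro d
    rw [List.foldl_cons, ih, pv_inner_mem,
      show (∃ pa ∈ w.toList.zipIdx, (w.toList.take pa.2, w.toList.drop (pa.2 + 1)) = (p, s) ∧ pa.1 = c)
          ↔ w.toList = p ++ [c] ++ s from pv_decomp _ _ _ _]
    simp only [List.mem_cons]
    constructor
    · rintro ((h | h) | ⟨w', hw', hts⟩)
      · exact Or.inl h
      · exact Or.inr ⟨w, Or.inl rfl, h⟩
      · exact Or.inr ⟨w', Or.inr hw', hts⟩
    · rintro (h | ⟨w', hw' | hw', hts⟩)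
      · exact Or.inl (Or.inl h)
      · subst hw'; exact Or.inl (Or.inr hts)
      · exact Or.inr ⟨w', hw', hts⟩

lemma pv_bucket_nodup (words : List String) (key : List Char × List Char) :
    ((pvB_buckets words).getD key PySem.Set.empty : List Char).Nodup := by
  rw [pv_buckets_eq]
  suffices h : ∀ (d : PySem.Dict (List Char × List Char) (PySem.Set Char)),
      (∀ k, (d.getD k PySem.Set.empty : List Char).Nodup) →
      ∀ k, ((words.foldl (fun d w =>
        w.toList.zipIdx.foldl (fun d pa =>
          d.modify (w.toList.take pa.2, w.toList.drop (pa.2 + 1)) PySem.Set.empty (fun st => st.add pa.1)) d) d).getD k PySem.Set.empty : List Char).Nodup by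
    exact h _ (by simp [PySem.Set.empty]) key
  induction words with
  | nil => intro d hd k; exact hd k
  | cons w ws ih =>
    intro d hd k
    rw [List.foldl_cons]
    exact ih _ (fun k' => pv_inner_nodup _ _ _ hd k') k

-- sorted bucket = the alphabet filtered to the letters present at the pattern
lemma pv_sorted_bucket (words : List String)
    (hpre : Pre_get_all_variants_at_each_postion words) (p s : List Char) :
    PySem.List.sorted ((pvB_buckets words).getD (p, s) PySem.Set.empty) id
      = pvAlph.filter (fun c => words.contains (String.ofList (p ++ [c] ++ s))) := by
  apply PySem.List.sorted_eq_of_perm_of_pairwise_lt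
  · rw [List.perm_ext_iff_of_nodup
      (((pv_alph_pairwise.sublist List.filter_sublist).imp (fun h => ne_of_lt h)))
      (pv_bucket_nodup words (p, s))]
    intro c
    rw [List.mem_filter, pv_mem_words, pv_bucket_mem]
    constructor
    · rintro ⟨-, h⟩; exact h
    · rintro ⟨w, hw, hts⟩
      refine ⟨?_, ⟨w, hw, hts⟩⟩
      exact pv_pre_mem hpre w hw c (by rw [hts]; simp)
  · exact (pv_alph_pairwise.sublist List.filter_sublist)

-- per-position equality of the two candidate lists
lemma pv_inner_eq (words : List String) (hpre : Pre_get_all_variants_at_each_postion words)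
    (cs : List Char) (i : Nat) (letter : Char) (hl : letter ∈ pvAlph) :
    pvA_wordList words cs i letter = pvB_cand (pvB_buckets words) cs i letter := by
  unfold pvA_wordList pvB_cand
  rw [pv_sorted_bucket words hpre]
  simp only [pv_slice_to, pv_slice_from, pvNewWord]
  rw [PySem.List.foldl_append_if (fun c => words.contains (String.ofList (cs.take i ++ [c] ++ cs.drop (i + 1))))
        (fun c => String.ofList (cs.take i ++ [c] ++ cs.drop (i + 1)))]
  rw [pv_alph_drop letter hl, List.filter_filter, List.filter_filter, List.nil_append]
  congr 1
  apply List.filter_congr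
  intro c hc
  rw [pv_alph_le_z c hc]
  simp [Bool.and_comm]

-- best lists agree position by position
lemma pv_best_eq (words : List String) (hpre : Pre_get_all_variants_at_each_postion words)
    (w : String) (hw : w ∈ words) :
    pvA_best words w.toList = pvB_best (pvB_buckets words) w.toList := by
  unfold pvA_best pvB_best
  apply PySem.List.foldl_congr_mem
  intro acc x hx
  have hmem : x.1 ∈ w.toList := by
    have := List.mem_zipIdx hx
    rcases this with ⟨-, hlt, hget⟩
    rw [hget]
    exact List.getElem_mem _
  rw [pv_inner_eq words hpre w.toList x.2 x.1 (pv_pre_mem hpre w hw x.1 hmem)]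

-- ===== VERDICT (by name: the statement is the Claim_ definition above) =====
theorem get_all_variants_at_each_postion_spec : Claim_equal_get_all_variants_at_each_postion := by
  intro words _ hpre
  unfold Spec_get_all_variants_at_each_postion
  unfold get_all_variants_at_each_postion get_all_variants_at_each_postion_alt
  congr 1
  apply PySem.List.foldl_congr_mem
  intro acc w hw
  rw [pv_best_eq words hpre w hw]
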